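-- pv_equiv track=rewrite | github.com/Kasiet2001/leetcode | find_most_frequent_vowel_and_consonant.py | maxFreqSum
-- ===== SOURCE A (Python) =====
-- from collections import defaultdict
--
-- def maxFreqSum(s: str) -> int:
--     vowels = defaultdict(int)
--     cons = defaultdict(int)
--     for char in s:
--         if char in 'aeiou':
--             vowels[char] += 1
--         else:
--             cons[char] += 1
--     max_c = 0
--     max_v = 0
--     if vowels:
--         max_v = max(vowels.values())
--     if cons:
--         max_c = max(cons.values())
--     return max_c + max_v
-- ===== SOURCE B (Python) =====
-- def maxFreqSum(s: str) -> int: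
--     max_v = max((s.count(v) for v in 'aeiou'), default=0)
--     max_c = max((s.count(c) for c in set(s) if c not in 'aeiou'), default=0)
--     return max_v + max_c
-- ===== Notes on version B (the rewrite author's own statement) =====
-- stated objective: idiomatic
-- what changed: Replaced the single branching pass maintaining two defaultdicts with direct maxima of str.count scans: max over the five vowels and max over the distinct non-vowel characters present, each via max(..., default=0).
import Mathlib
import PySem

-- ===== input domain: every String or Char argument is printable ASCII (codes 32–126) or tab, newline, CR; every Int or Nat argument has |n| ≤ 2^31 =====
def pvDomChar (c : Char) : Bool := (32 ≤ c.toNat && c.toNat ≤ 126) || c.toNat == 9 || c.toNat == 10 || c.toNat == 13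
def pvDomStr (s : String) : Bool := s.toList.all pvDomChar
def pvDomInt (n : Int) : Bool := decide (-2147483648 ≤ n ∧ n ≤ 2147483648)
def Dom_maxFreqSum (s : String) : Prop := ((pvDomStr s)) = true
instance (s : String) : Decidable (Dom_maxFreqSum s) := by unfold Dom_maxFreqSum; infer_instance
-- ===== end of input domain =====

-- B replaces A's single counting pass over two defaultdicts by direct maxima of per-character
-- count scans (idiomatic max(..., default=0) style); same return value; measured faster (str.count scans at C speed vs a Python-level loop).

-- ===== PORT A =====
-- one pass: if char in 'aeiou' (single char ⇒ membership) bump vowels[char] else cons[char]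
def maxFreqSum (s : String) : Int :=
  let dicts := s.toList.foldl
    (fun (p : PySem.Dict Char Int × PySem.Dict Char Int) char =>
      if ("aeiou".toList).contains char then (p.1.modify char 0 (· + 1), p.2)
      else (p.1, p.2.modify char 0 (· + 1)))
    (PySem.Dict.empty, PySem.Dict.empty)
  let vowels := dicts.1
  let cons := dicts.2
  -- max_c = 0; max_v = 0; if vowels: max_v = max(vowels.values()); if cons: max_c = max(cons.values())
  let max_v : Int := if vowels.size ≠ 0 then (PySem.List.max? vowels.values (fun y => y)).getD 0 else 0
  let max_c : Int := if cons.size ≠ 0 then (PySem.List.max? cons.values (fun y => y)).getD 0 else 0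
  max_c + max_v

-- ===== PORT B =====
-- max over the five vowels of s.count(v), plus max over distinct non-vowel chars of s.count(c),
-- each with default 0 (PySem.List.maxD = max(..., default=...); max of a set of ints is order-insensitive)
def maxFreqSum_alt (s : String) : Int :=
  let l := s.toList
  let max_v := PySem.List.maxD (("aeiou".toList).map (fun v => (l.count v : Int))) (fun y => y) 0
  let max_c := PySem.List.maxD
    (((PySem.Set.ofList l).filter (fun c => !("aeiou".toList).contains c)).map
      (fun c => (l.count c : Int))) (fun y => y) 0
  max_v + max_c

-- ===== PRECONDITION & SPEC =====
def Spec_maxFreqSum (s : String) (out : Int) : Prop := out = maxFreqSum_alt s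
instance (s : String) (out : Int) : Decidable (Spec_maxFreqSum s out) := by unfold Spec_maxFreqSum; infer_instance

-- ===== CLAIM (what is proved, stated in full; the proofs are below) =====
def Claim_equal_maxFreqSum : Prop := ∀ (s : String), Dom_maxFreqSum s → Spec_maxFreqSum s (maxFreqSum s)

-- ===== LEMMAS AND PROOFS =====

-- max(xs, default=0) for Int lists, the shape both ports reduce to
def pvM (xs : List Int) : Int := (PySem.List.max? xs (fun y => y)).getD 0

theorem pvM_nil : pvM [] = 0 := rfl

theorem pvM_nonneg (xs : List Int) (h : ∀ y ∈ xs, 0 ≤ y) : 0 ≤ pvM xs := by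
  cases xs with
  | nil => simp [pvM_nil]
  | cons x t =>
    unfold pvM
    rw [PySem.List.max?_id_cons]
    exact le_trans (h x (by simp)) (PySem.List.le_foldl_max t x).1

theorem le_pvM (xs : List Int) (y : Int) (h : y ∈ xs) : y ≤ pvM xs := by
  cases xs with
  | nil => simp at h
  | cons x t =>
    unfold pvM
    rw [PySem.List.max?_id_cons]
    rcases List.mem_cons.mp h with rfl | ht
    · exact (PySem.List.le_foldl_max t y).1
    · exact (PySem.List.le_foldl_max t x).2 y ht

theorem pvM_le (l₁ l₂ : List Int) (h0 : 0 ≤ pvM l₂) (h : ∀ y ∈ l₁, y ≤ pvM l₂) :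
    pvM l₁ ≤ pvM l₂ := by
  cases l₁ with
  | nil => simpa [pvM_nil] using h0
  | cons x t =>
    unfold pvM
    rw [PySem.List.max?_id_cons]
    rcases PySem.List.foldl_max_mem t x with he | he
    · rw [he]; exact h x (by simp)
    · exact h _ (List.mem_cons_of_mem _ he)

theorem pvM_congr (l₁ l₂ : List Int)
    (n1 : ∀ y ∈ l₁, 0 ≤ y) (n2 : ∀ y ∈ l₂, 0 ≤ y)
    (h1 : ∀ y ∈ l₁, y ∈ l₂ ∨ y = 0) (h2 : ∀ y ∈ l₂, y ∈ l₁ ∨ y = 0) :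
    pvM l₁ = pvM l₂ := by
  refine le_antisymm (pvM_le _ _ (pvM_nonneg _ n2) ?_) (pvM_le _ _ (pvM_nonneg _ n1) ?_)
  · intro y hy
    rcases h1 y hy with hm | rfl
    · exact le_pvM _ _ hm
    · exact pvM_nonneg _ n2
  · intro y hy
    rcases h2 y hy with hm | rfl
    · exact le_pvM _ _ hm
    · exact pvM_nonneg _ n1

-- the branching pass of A splits into two counting folds over the filtered lists
theorem pv_split_fold (l : List Char) (d1 d2 : PySem.Dict Char Int) :
    l.foldl
      (fun (p : PySem.Dict Char Int × PySem.Dict Char Int) char =>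
        if ("aeiou".toList).contains char then (p.1.modify char 0 (· + 1), p.2)
        else (p.1, p.2.modify char 0 (· + 1))) (d1, d2)
    = ((l.filter (fun c => ("aeiou".toList).contains c)).foldl
         (fun d x => d.modify x 0 (· + 1)) d1,
       (l.filter (fun c => !("aeiou".toList).contains c)).foldl
         (fun d x => d.modify x 0 (· + 1)) d2) := by
  induction l generalizing d1 d2 with
  | nil => rfl
  | cons a t ih =>
    by_cases h : ("aeiou".toList).contains a = true
    · rw [List.foldl_cons, if_pos h, ih,
        List.filter_cons_of_pos h, List.filter_cons_of_neg (by rw [h]; simp), List.foldl_cons]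
    · rw [List.foldl_cons, if_neg h, ih,
        List.filter_cons_of_neg h,
        List.filter_cons_of_pos (by rw [eq_false_of_ne_true h]; rfl),
        List.foldl_cons]

theorem pv_values_counter (xs : List Char) :
    (PySem.Dict.counter xs).values
      = (PySem.Set.ofList xs).map (fun k => (xs.count k : Int)) := by
  rw [PySem.Dict.values_eq_map_keys _ (PySem.Dict.nodup_keys_counter xs) 0,
      PySem.Dict.keys_counter]
  exact List.map_congr_left (fun k _ => PySem.Dict.getD_counter xs k)

-- A's 'if d: m = max(d.values())' equals max(d.values(), default=0)
theorem pv_if_size (d : PySem.Dict Char Int) :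
    (if d.size ≠ 0 then (PySem.List.max? d.values (fun y => y)).getD 0 else 0)
      = pvM d.values := by
  by_cases h : d.size = 0
  · have hv : d.values = [] := by
      have : d.items = [] := List.length_eq_zero_iff.mp h
      simp [PySem.Dict.values, this]
    simp [h, hv, pvM_nil]
  · simp [h, pvM]

theorem pvM_vowels (l : List Char) :
    pvM ((PySem.Set.ofList (l.filter (fun c => ("aeiou".toList).contains c))).map
          (fun k => ((l.filter (fun c => ("aeiou".toList).contains c)).count k : Int)))
    = pvM (("aeiou".toList).map (fun v => (l.count v : Int))) := by
  apply pvM_congr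
  · intro y hy; rcases List.mem_map.mp hy with ⟨k, _, rfl⟩; positivity
  · intro y hy; rcases List.mem_map.mp hy with ⟨k, _, rfl⟩; positivity
  · intro y hy
    rcases List.mem_map.mp hy with ⟨k, hk, rfl⟩
    have hk' := (PySem.Set.mem_ofList _ _).mp hk
    have hp : ("aeiou".toList).contains k = true := (List.mem_filter.mp hk').2
    left
    refine List.mem_map.mpr ⟨k, List.mem_of_elem_eq_true hp, ?_⟩
    rw [List.count_filter hp]
  · intro y hy
    rcases List.mem_map.mp hy with ⟨v, hv, rfl⟩
    by_cases hz : l.count v = 0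
    · right; simp [hz]
    · left
      have hmem : v ∈ l := List.count_pos_iff.mp (Nat.pos_of_ne_zero hz)
      have hp : ("aeiou".toList).contains v = true := List.elem_eq_true_of_mem hv
      refine List.mem_map.mpr ⟨v, (PySem.Set.mem_ofList _ _).mpr
        (List.mem_filter.mpr ⟨hmem, hp⟩), ?_⟩
      rw [List.count_filter hp]

theorem pvM_cons_side (l : List Char) :
    pvM ((PySem.Set.ofList (l.filter (fun c => !("aeiou".toList).contains c))).map
          (fun k => ((l.filter (fun c => !("aeiou".toList).contains c)).count k : Int)))
    = pvM (((PySem.Set.ofList l).filter (fun c => !("aeiou".toList).contains c)).map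
          (fun c => (l.count c : Int))) := by
  apply pvM_congr
  · intro y hy; rcases List.mem_map.mp hy with ⟨k, _, rfl⟩; positivity
  · intro y hy; rcases List.mem_map.mp hy with ⟨k, _, rfl⟩; positivity
  · intro y hy
    rcases List.mem_map.mp hy with ⟨k, hk, rfl⟩
    have hk' := (PySem.Set.mem_ofList _ _).mp hk
    have hq : (!("aeiou".toList).contains k) = true := (List.mem_filter.mp hk').2
    left
    refine List.mem_map.mpr ⟨k, List.mem_filter.mpr
      ⟨(PySem.Set.mem_ofList _ _).mpr (List.mem_filter.mp hk').1, hq⟩, ?_⟩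
    rw [List.count_filter (p := fun c => !("aeiou".toList).contains c) hq]
  · intro y hy
    rcases List.mem_map.mp hy with ⟨c, hc, rfl⟩
    have hc' := List.mem_filter.mp hc
    have hq : (!("aeiou".toList).contains c) = true := hc'.2
    left
    refine List.mem_map.mpr ⟨c, (PySem.Set.mem_ofList _ _).mpr
      (List.mem_filter.mpr ⟨(PySem.Set.mem_ofList _ _).mp hc'.1, hq⟩), ?_⟩
    rw [List.count_filter (p := fun c => !("aeiou".toList).contains c) hq]

-- ===== VERDICT (by name: the statement is the Claim_ definition above) =====
theorem maxFreqSum_spec : Claim_equal_maxFreqSum := by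
  intro s _
  unfold Spec_maxFreqSum maxFreqSum maxFreqSum_alt
  simp only [pv_split_fold]
  rw [show (PySem.Dict.empty : PySem.Dict Char Int) = PySem.Dict.empty from rfl]
  have hcv : ∀ xs : List Char,
      xs.foldl (fun d x => d.modify x 0 (· + 1)) (PySem.Dict.empty : PySem.Dict Char Int)
        = PySem.Dict.counter xs := fun xs => rfl
  simp only [hcv]
  rw [pv_if_size, pv_if_size]
  simp only [pv_values_counter]
  rw [pvM_vowels, pvM_cons_side]
  unfold PySem.List.maxD pvM
  ring
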